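-- pv_equiv track=rewrite | github.com/cirosantilli/project-euler-solutions | solvers/781.py | build_series
-- ===== SOURCE A (Python) =====
-- MOD = 1_000_000_007
--
-- def build_series(M: int) -> tuple[list[int], list[int]]:
--     """
--     Build A(h) and B(h) for degrees 0..M:
--
--       A_m = (2m-1)!! * [x^(2m)] e^{-x}/(1-x)
--       B_m = (2m-1)!! * [x^(2m)] e^{-x}/(1-x)^2
--     """
--     N = 2 * M
--
--     # invfact[k] = 1/k!
--     fact = [1] * (N + 1)
--     for i in range(1, N + 1):
--         fact[i] = (fact[i - 1] * i) % MOD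
--     invfact = [1] * (N + 1)
--     invfact[N] = pow(fact[N], MOD - 2, MOD)
--     for i in range(N, 0, -1):
--         invfact[i - 1] = (invfact[i] * i) % MOD
--
--     # S[r] = sum_{k=0..r} (-1)^k / k!  (mod MOD)
--     S = [0] * (N + 1)
--     acc = 0
--     for r in range(N + 1):
--         term = invfact[r]
--         if r & 1:
--             term = MOD - term
--         acc += term
--         if acc >= MOD:
--             acc -= MOD
--         S[r] = acc
--
--     A = [0] * (M + 1)
--     B = [0] * (M + 1)
--
--     df = 1  # (2m-1)!!, with (-1)!! = 1 at m=0
--     for m in range(M + 1):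
--         if m > 0:
--             df = (df * (2 * m - 1)) % MOD
--
--         s2m = S[2 * m]
--         s2m_1 = S[2 * m - 1] if 2 * m - 1 >= 0 else 0
--
--         a = s2m
--         b = ((2 * m + 1) * s2m + s2m_1) % MOD
--
--         A[m] = (df * a) % MOD
--         B[m] = (df * b) % MOD
--
--     return A, B
-- ===== SOURCE B (Python) =====
-- MOD = 1_000_000_007
--
-- def build_series(M: int) -> tuple[list[int], list[int]]:
--     # Same fact/invfact precompute; then one fused m-loop with two running
--     # scalar accumulators f (series prefix sum) and g (its prefix-of-prefix sum),
--     # instead of the S array and the closed-form (2m+1)*S[2m]+S[2m-1].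
--     N = 2 * M
--     fact = [1] * (N + 1)
--     for i in range(1, N + 1):
--         fact[i] = (fact[i - 1] * i) % MOD
--     invfact = [1] * (N + 1)
--     invfact[N] = pow(fact[N], MOD - 2, MOD)
--     for i in range(N, 0, -1):
--         invfact[i - 1] = (invfact[i] * i) % MOD
--
--     A = []
--     B = []
--     df = 1
--     f = 0
--     g = 0
--     for m in range(M + 1):
--         if m > 0:
--             df = (df * (2 * m - 1)) % MOD
--         for idx in (2 * m - 1, 2 * m):
--             if idx >= 0:
--                 t = invfact[idx]
--                 f = (f - t) % MOD if idx & 1 else (f + t) % MOD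
--                 g = (g + f) % MOD
--         A.append((df * f) % MOD)
--         B.append((df * g) % MOD)
--     return A, B
-- ===== Notes on version B (the rewrite author's own statement) =====
-- stated objective: alternative
-- what changed: Keeps the fact/invfact precomputation but drops A's separate S prefix-sum array and the closed-form B-value (2m+1)*S[2m]+S[2m-1], instead fusing everything into the single m-loop with two running scalar accumulators f (the alternating series prefix sum) and g (its running prefix-of-prefix sum, provably congruent to the closed form).
import Mathlib
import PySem

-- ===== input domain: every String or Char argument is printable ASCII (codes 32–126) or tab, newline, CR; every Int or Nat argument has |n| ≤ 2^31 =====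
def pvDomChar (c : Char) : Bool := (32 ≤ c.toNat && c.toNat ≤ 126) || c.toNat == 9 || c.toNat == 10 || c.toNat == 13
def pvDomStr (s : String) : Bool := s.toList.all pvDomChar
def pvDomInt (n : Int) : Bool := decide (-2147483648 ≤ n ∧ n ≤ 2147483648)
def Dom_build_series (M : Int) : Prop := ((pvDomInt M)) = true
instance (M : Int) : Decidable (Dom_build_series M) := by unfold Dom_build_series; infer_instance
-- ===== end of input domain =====

-- B replaces A's S prefix-sum array and closed-form B-value by two running scalar
-- accumulators (f, g) fused into the main m-loop (objective: alternative decomposition).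

def pvMOD : Int := 1000000007

-- hand port of Python's 3-argument pow(b, e, m): binary exponentiation reducing mod m at each
-- step (exact: pvPowMod_eq_powMod below proves it equals PySem.Int.powMod for 0 < m)
def pvPowMod (b : Int) (e : Nat) (m : Int) : Int :=
  if e = 0 then PySem.Int.mod 1 m
  else
    let half := pvPowMod (PySem.Int.mod (b * b) m) (e / 2) m
    if e % 2 = 1 then PySem.Int.mod (half * b) m else half
decreasing_by exact Nat.div_lt_self (Nat.pos_of_ne_zero (by assumption)) (by norm_num)

-- shared precomputation: both Source A and Source B contain this identical fact/invfact code
def pvInvfact (M : Int) : List Int :=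
  let N := 2 * M
  let fact := (PySem.List.pyRange 1 (N + 1) 1).foldl
      (fun fact i => fact.set i.toNat (PySem.Int.mod (PySem.List.pyGetD fact (i - 1) 0 * i) pvMOD))
      (List.replicate (N + 1).toNat 1)
  let invfact0 := (List.replicate (N + 1).toNat (1 : Int)).set N.toNat
      (pvPowMod (PySem.List.pyGetD fact N 0) (pvMOD - 2).toNat pvMOD)
  (PySem.List.pyRange N 0 (-1)).foldl
      (fun invfact i => invfact.set (i - 1).toNat (PySem.Int.mod (PySem.List.pyGetD invfact i 0 * i) pvMOD))
      invfact0

-- ===== PORT A =====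
def build_series (M : Int) : List Int × List Int :=
  let N := 2 * M
  let invfact := pvInvfact M
  let Sacc := (PySem.List.pyRange 0 (N + 1) 1).foldl
      (fun (st : List Int × Int) r =>
        let term := PySem.List.pyGetD invfact r 0
        let term := if PySem.Int.band r 1 ≠ 0 then pvMOD - term else term
        let acc := st.2 + term
        let acc := if pvMOD ≤ acc then acc - pvMOD else acc
        (st.1.set r.toNat acc, acc))
      (List.replicate (N + 1).toNat 0, 0)
  let S := Sacc.1
  let fin := (PySem.List.pyRange 0 (M + 1) 1).foldl
      (fun (st : List Int × List Int × Int) m =>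
        let df := if 0 < m then PySem.Int.mod (st.2.2 * (2 * m - 1)) pvMOD else st.2.2
        let s2m := PySem.List.pyGetD S (2 * m) 0
        let s2m1 := if 0 ≤ 2 * m - 1 then PySem.List.pyGetD S (2 * m - 1) 0 else 0
        let a := s2m
        let b := PySem.Int.mod ((2 * m + 1) * s2m + s2m1) pvMOD
        (st.1.set m.toNat (PySem.Int.mod (df * a) pvMOD),
         st.2.1.set m.toNat (PySem.Int.mod (df * b) pvMOD), df))
      (List.replicate (M + 1).toNat 0, List.replicate (M + 1).toNat 0, 1)
  (fin.1, fin.2.1)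

-- ===== PORT B =====
def build_series_alt (M : Int) : List Int × List Int :=
  let invfact := pvInvfact M
  let fin := (PySem.List.pyRange 0 (M + 1) 1).foldl
      (fun (st : List Int × List Int × Int × Int × Int) m =>
        let df := if 0 < m then PySem.Int.mod (st.2.2.1 * (2 * m - 1)) pvMOD else st.2.2.1
        let fg := [2 * m - 1, 2 * m].foldl
          (fun (fg : Int × Int) idx =>
            if 0 ≤ idx then
              let t := PySem.List.pyGetD invfact idx 0
              let f := if PySem.Int.band idx 1 ≠ 0 then PySem.Int.mod (fg.1 - t) pvMOD
                       else PySem.Int.mod (fg.1 + t) pvMOD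
              (f, PySem.Int.mod (fg.2 + f) pvMOD)
            else fg)
          (st.2.2.2.1, st.2.2.2.2)
        (st.1 ++ [PySem.Int.mod (df * fg.1) pvMOD],
         st.2.1 ++ [PySem.Int.mod (df * fg.2) pvMOD], df, fg.1, fg.2))
      ([], [], 1, 0, 0)
  (fin.1, fin.2.1)

-- ===== PRECONDITION & SPEC =====
-- Pre: for negative M the Python A raises IndexError (invfact[N] on an empty/short list); B raises there too.
def Pre_build_series (M : Int) : Prop := 0 ≤ M
instance (M : Int) : Decidable (Pre_build_series M) := by unfold Pre_build_series; infer_instance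
def pvWitness_build_series : Int := (3)
def Spec_build_series (M : Int) (out : List Int × List Int) : Prop := out = build_series_alt M
instance (M : Int) (out : List Int × List Int) : Decidable (Spec_build_series M out) := by unfold Spec_build_series; infer_instance

-- ===== CLAIM (what is proved, stated in full; the proofs are below) =====
def Claim_equal_build_series : Prop := ∀ (M : Int), Dom_build_series M → Pre_build_series M → Spec_build_series M (build_series M)


-- ===== LEMMAS AND PROOFS =====

-- ---- generalities about mod pvMOD ----
lemma pvMOD_pos : (0:Int) < pvMOD := by norm_num [pvMOD]

lemma pvmod_emod (x : Int) : PySem.Int.mod x pvMOD = x % pvMOD :=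
  PySem.Int.mod_eq_emod_of_pos pvMOD_pos

lemma modp_eq (x r : Int) (h0 : 0 ≤ r) (h1 : r < pvMOD) (hd : pvMOD ∣ x - r) :
    PySem.Int.mod x pvMOD = r := by
  rw [pvmod_emod]
  have : x % pvMOD = r % pvMOD := Int.ModEq.symm (Int.modEq_iff_dvd.mpr (by
    simpa using hd))
  rw [this, Int.emod_eq_of_lt h0 h1]

lemma band_nat_one (j : ℕ) : (PySem.Int.band (j:Int) 1 ≠ 0) ↔ (j % 2 = 1) := by
  rw [PySem.Int.band_one]
  have : ((2:Int)) = ((2:ℕ):Int) := by norm_num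
  rw [this, PySem.Int.mod_natCast]
  omega

-- ---- reference sequences (downward invfact recursion, S accumulator, df, f, g) ----
def pvInvDown (N : ℕ) (v : Int) : ℕ → Int
  | 0 => v
  | d+1 => PySem.Int.mod (pvInvDown N v d * ((N - d : ℕ) : Int)) pvMOD

def pvInv (n : ℕ) (v : Int) (i : ℕ) : Int := pvInvDown (2*n) v (2*n - i)

def pvTerm (n : ℕ) (v : Int) (k : ℕ) : Int :=
  if k % 2 = 1 then pvMOD - pvInv n v k else pvInv n v k

def pvStep (acc t : Int) : Int := if pvMOD ≤ acc + t then acc + t - pvMOD else acc + t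

def pvSAcc (n : ℕ) (v : Int) : ℕ → Int
  | 0 => pvStep 0 (pvTerm n v 0)
  | k+1 => pvStep (pvSAcc n v k) (pvTerm n v (k+1))

def pvDf : ℕ → Int
  | 0 => 1
  | m+1 => PySem.Int.mod (pvDf m * (2*((m:Int)+1) - 1)) pvMOD

def pvGI (n : ℕ) (v : Int) : ℕ → Int
  | 0 => PySem.Int.mod (0 + pvSAcc n v 0) pvMOD
  | k+1 => PySem.Int.mod (pvGI n v k + pvSAcc n v (k+1)) pvMOD

def pvA (n : ℕ) (v : Int) (m : ℕ) : Int :=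
  PySem.Int.mod (pvDf m * pvSAcc n v (2*m)) pvMOD

def pvB (n : ℕ) (v : Int) (m : ℕ) : Int :=
  PySem.Int.mod (pvDf m *
    (PySem.Int.mod ((2*(m:Int)+1) * pvSAcc n v (2*m) +
      (if 1 ≤ m then pvSAcc n v (2*m-1) else 0)) pvMOD)) pvMOD

def pvB' (n : ℕ) (v : Int) (m : ℕ) : Int :=
  PySem.Int.mod (pvDf m * pvGI n v (2*m)) pvMOD

-- ---- bounds ----
lemma pvInvDown_bounds (N : ℕ) (v : Int) (hv0 : 0 ≤ v) (hv1 : v < pvMOD) (d : ℕ) :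
    0 ≤ pvInvDown N v d ∧ pvInvDown N v d < pvMOD := by
  induction d with
  | zero => exact ⟨hv0, hv1⟩
  | succ d _ =>
    exact ⟨PySem.Int.mod_nonneg _ pvMOD_pos, PySem.Int.mod_lt _ pvMOD_pos⟩

lemma pvInv_bounds (n : ℕ) (v : Int) (hv0 : 0 ≤ v) (hv1 : v < pvMOD) (i : ℕ) :
    0 ≤ pvInv n v i ∧ pvInv n v i < pvMOD :=
  pvInvDown_bounds _ v hv0 hv1 _

lemma pvSAcc_bounds (n : ℕ) (v : Int) (hv0 : 0 ≤ v) (hv1 : v < pvMOD) (k : ℕ) :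
    0 ≤ pvSAcc n v k ∧ pvSAcc n v k < pvMOD := by
  have hterm : ∀ k, 0 ≤ pvTerm n v k ∧ pvTerm n v k ≤ pvMOD := by
    intro k
    have h := pvInv_bounds n v hv0 hv1 k
    unfold pvTerm
    split <;> omega
  induction k with
  | zero =>
    have h := hterm 0
    simp only [pvSAcc, pvStep]
    split <;> omega
  | succ k ih =>
    have h := hterm (k+1)
    simp only [pvSAcc, pvStep]
    split <;> omega

-- ---- characterisation of pvInvfact ----
lemma set_map_range (m j : ℕ) (hj : j < m) (g : ℕ → Int) (w : Int) :
    ((List.range m).map g).set j w = (List.range m).map (fun k => if k = j then w else g k) := by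
  apply List.ext_getElem
  · simp
  · intro k h1 h2
    simp only [List.getElem_set, List.getElem_map, List.getElem_range]
    simp only [List.length_set, List.length_map, List.length_range] at h1
    by_cases hk : j = k
    · simp [hk]
    · simp [hk, Ne.symm hk]

lemma map_range_congr (m : ℕ) (g h : ℕ → Int) (he : ∀ k < m, g k = h k) :
    (List.range m).map g = (List.range m).map h := by
  apply List.map_congr_left
  intro k hk
  exact he k (List.mem_range.mp hk)

lemma pvPowMod_eq_powMod (b : Int) (e : ℕ) {m : Int} (hm : 0 < m) :
    pvPowMod b e m = PySem.Int.powMod b e m := by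
  induction e using Nat.strong_induction_on generalizing b with
  | _ e ih =>
    rw [pvPowMod]
    by_cases he : e = 0
    · rw [if_pos he, he, PySem.Int.powMod, pow_zero]
    · rw [if_neg he]
      have hhalf : pvPowMod (PySem.Int.mod (b * b) m) (e / 2) m
          = (PySem.Int.mod (b * b) m) ^ (e / 2) % m := by
        rw [ih (e / 2) (Nat.div_lt_self (Nat.pos_of_ne_zero he) (by norm_num)) _,
            PySem.Int.powMod, PySem.Int.mod_eq_emod_of_pos hm]
      have hmodsq : (PySem.Int.mod (b * b) m) ^ (e / 2) % m = b ^ (2 * (e / 2)) % m := by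
        rw [PySem.Int.mod_eq_emod_of_pos hm]
        have h2 : ((b*b) % m) ^ (e/2) ≡ (b*b)^(e/2) [ZMOD m] :=
          Int.ModEq.pow _ (Int.emod_emod_of_dvd _ dvd_rfl)
        have h3 : (b*b)^(e/2) = b^(2*(e/2)) := by rw [pow_mul, pow_two]
        rw [← h3]
        exact h2
      by_cases hp : e % 2 = 1
      · rw [if_pos hp]
        show PySem.Int.mod (pvPowMod (PySem.Int.mod (b * b) m) (e / 2) m * b) m = _
        rw [hhalf, hmodsq, PySem.Int.mod_eq_emod_of_pos hm]
        have h4 : (b^(2*(e/2)) % m * b) % m = (b^(2*(e/2)) * b) % m :=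
          Int.ModEq.mul_right b (Int.emod_emod_of_dvd _ dvd_rfl)
        rw [h4, ← pow_succ, PySem.Int.powMod, PySem.Int.mod_eq_emod_of_pos hm]
        congr 2
        omega
      · rw [if_neg hp]
        show pvPowMod (PySem.Int.mod (b * b) m) (e / 2) m = _
        rw [hhalf, hmodsq, PySem.Int.powMod, PySem.Int.mod_eq_emod_of_pos hm]
        congr 2
        omega

lemma pvPowMod_bounds (b : Int) (e : ℕ) {m : Int} (hm : 0 < m) :
    0 ≤ pvPowMod b e m ∧ pvPowMod b e m < m := by
  rw [pvPowMod_eq_powMod b e hm]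
  exact ⟨PySem.Int.powMod_nonneg b e hm, PySem.Int.powMod_lt b e hm⟩

lemma getD_set (X : List Int) (j k : ℕ) (w : Int) (hj : j < X.length) (hk : k < X.length) :
    (X.set j w).getD k 0 = if k = j then w else X.getD k 0 := by
  rw [List.getD_eq_getElem?_getD, List.getElem?_set]
  by_cases hkj : k = j
  · subst hkj
    rw [if_pos rfl, if_pos rfl]
    simp [hk]
  · rw [if_neg (fun h => hkj h.symm), if_neg hkj, List.getD_eq_getElem?_getD]

lemma dfold_char (n : ℕ) (v : Int) (j : ℕ) (hj : j ≤ 2*n) :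
    ∀ (X : List Int), X.length = 2*n+1 →
      (∀ k, j ≤ k → k ≤ 2*n → X.getD k 0 = pvInv n v k) →
      ∀ k, k ≤ 2*n →
        (((PySem.List.pyRange ((j:ℕ):Int) 0 (-1)).foldl
          (fun invfact i => invfact.set (i - 1).toNat
            (PySem.Int.mod (PySem.List.pyGetD invfact i 0 * i) pvMOD)) X)).getD k 0 = pvInv n v k := by
  induction j with
  | zero =>
    intro X _ hX k hk
    rw [Nat.cast_zero, PySem.List.pyRange_neg_one_eq_nil (by norm_num), List.foldl_nil]
    exact hX k (by omega) hk
  | succ j ih =>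
    intro X hlen hX k hk
    have hcast : ((j+1 : ℕ) : Int) = ((j:ℕ):Int)+1 := by push_cast; ring
    rw [PySem.List.pyRange_neg_one_cons (by positivity), List.foldl_cons]
    have he1 : (((j+1:ℕ):Int)) - 1 = ((j:ℕ):Int) := by push_cast; ring
    rw [he1, Int.toNat_natCast, PySem.List.pyGetD_natCast]
    rw [hX (j+1) (by omega) (by omega)]
    have hinvj : PySem.Int.mod (pvInv n v (j+1) * ((j+1:ℕ):Int)) pvMOD = pvInv n v j := by
      have h1 : 2*n - j = (2*n - (j+1)) + 1 := by omega
      show _ = pvInvDown (2*n) v (2*n - j)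
      rw [h1]
      show _ = PySem.Int.mod (pvInvDown (2*n) v (2*n - (j+1)) * ((2*n - (2*n - (j+1)) : ℕ) : Int)) pvMOD
      have h2 : ((2*n - (2*n - (j+1)) : ℕ) : Int) = ((j+1:ℕ):Int) := by omega
      rw [h2]
      rfl
    rw [hinvj]
    exact ih (by omega) (X.set j (pvInv n v j)) (by simp [hlen])
      (fun k' hk1 hk2 => by
        rw [getD_set X j k' _ (by omega) (by omega)]
        by_cases hkj : k' = j
        · rw [if_pos hkj, hkj]
        · rw [if_neg hkj]
          exact hX k' (by omega) hk2) k hk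

lemma invfact_char (n : ℕ) :
    ∃ v : Int, 0 ≤ v ∧ v < pvMOD ∧
      ∀ k ≤ 2*n, (pvInvfact (n:Int)).getD k 0 = pvInv n v k := by
  unfold pvInvfact
  simp only
  set w := pvPowMod (PySem.List.pyGetD ((PySem.List.pyRange 1 (2 * ((n:ℕ):Int) + 1) 1).foldl
      (fun fact i => fact.set i.toNat (PySem.Int.mod (PySem.List.pyGetD fact (i - 1) 0 * i) pvMOD))
      (List.replicate (2 * ((n:ℕ):Int) + 1).toNat 1)) (2 * ((n:ℕ):Int)) 0) (pvMOD - 2).toNat pvMOD with hw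
  have hwb := pvPowMod_bounds (PySem.List.pyGetD ((PySem.List.pyRange 1 (2 * ((n:ℕ):Int) + 1) 1).foldl
      (fun fact i => fact.set i.toNat (PySem.Int.mod (PySem.List.pyGetD fact (i - 1) 0 * i) pvMOD))
      (List.replicate (2 * ((n:ℕ):Int) + 1).toNat 1)) (2 * ((n:ℕ):Int)) 0) (pvMOD - 2).toNat pvMOD_pos
  rw [← hw] at hwb
  refine ⟨w, hwb.1, hwb.2, ?_⟩
  intro k hk
  have e1 : (2 * ((n:ℕ):Int) + 1).toNat = 2*n+1 := by omega
  have e2 : (2 * ((n:ℕ):Int)).toNat = 2*n := by omega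
  have e3 : (2 * ((n:ℕ):Int)) = ((2*n : ℕ):Int) := by push_cast; ring
  rw [e1, e2, e3]
  refine dfold_char n w (2*n) le_rfl _ (by simp) ?_ k hk
  intro k' hk1 hk2
  have hk' : k' = 2*n := by omega
  subst hk'
  rw [getD_set _ (2*n) (2*n) w (by simp) (by simp), if_pos rfl]
  show w = pvInvDown (2*n) w (2*n - 2*n)
  rw [Nat.sub_self]
  rfl

-- ---- characterisation of A's S-building fold ----
lemma sfold_char (n : ℕ) (v : Int) (L : List Int)
    (hL : ∀ k ≤ 2*n, L.getD k 0 = pvInv n v k) (j : ℕ) (hj : j ≤ 2*n+1) :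
    ((PySem.List.pyRange 0 ((j:ℕ):Int) 1).foldl
      (fun (st : List Int × Int) r =>
        let term := PySem.List.pyGetD L r 0
        let term := if PySem.Int.band r 1 ≠ 0 then pvMOD - term else term
        let acc := st.2 + term
        let acc := if pvMOD ≤ acc then acc - pvMOD else acc
        (st.1.set r.toNat acc, acc))
      (List.replicate (2*n+1) 0, 0))
    = ((List.range (2*n+1)).map (fun k => if k < j then pvSAcc n v k else 0),
       if j = 0 then 0 else pvSAcc n v (j-1)) := by
  induction j with
  | zero =>
    rw [Nat.cast_zero, PySem.List.pyRange_one_eq_nil (by norm_num), List.foldl_nil]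
    simp
  | succ j ih =>
    have hj' : j ≤ 2*n+1 := by omega
    have hcast : ((j+1 : ℕ) : Int) = ((j:ℕ):Int)+1 := by push_cast; ring
    rw [hcast, PySem.List.pyRange_one_succ_right (by positivity), List.foldl_append,
        ih hj', List.foldl_cons, List.foldl_nil]
    have hterm2 : (if PySem.Int.band ((j:ℕ):Int) 1 ≠ 0 then pvMOD - PySem.List.pyGetD L ((j:ℕ):Int) 0
        else PySem.List.pyGetD L ((j:ℕ):Int) 0) = pvTerm n v j := by
      rw [PySem.List.pyGetD_natCast, hL j (by omega), pvTerm]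
      by_cases hpar : j % 2 = 1
      · rw [if_pos ((band_nat_one j).mpr hpar), if_pos hpar]
      · rw [if_neg (fun h => hpar ((band_nat_one j).mp h)), if_neg hpar]
    simp only [hterm2, Int.toNat_natCast]
    have hacc : (if pvMOD ≤ (if j = 0 then 0 else pvSAcc n v (j-1)) + pvTerm n v j
        then (if j = 0 then 0 else pvSAcc n v (j-1)) + pvTerm n v j - pvMOD
        else (if j = 0 then 0 else pvSAcc n v (j-1)) + pvTerm n v j) = pvSAcc n v j := by
      cases j with
      | zero => simp [pvSAcc, pvStep]
      | succ i => simp [pvSAcc, pvStep]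
    rw [hacc, set_map_range _ j (by omega)]
    refine Prod.ext ?_ (by simp)
    show (List.range (2*n+1)).map _ = (List.range (2*n+1)).map _
    apply map_range_congr
    intro k hk
    by_cases hkj : k = j
    · subst hkj; simp
    · simp only [if_neg hkj]
      by_cases hkl : k < j
      · rw [if_pos hkl, if_pos (by omega)]
      · rw [if_neg hkl, if_neg (by omega)]

-- ---- characterisation of A's main fold ----
lemma afold_char (n : ℕ) (v : Int) (S : List Int)
    (hS : ∀ k ≤ 2*n, S.getD k 0 = pvSAcc n v k) (j : ℕ) (hj : j ≤ n+1) :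
    ((PySem.List.pyRange 0 ((j:ℕ):Int) 1).foldl
      (fun (st : List Int × List Int × Int) m =>
        let df := if 0 < m then PySem.Int.mod (st.2.2 * (2 * m - 1)) pvMOD else st.2.2
        let s2m := PySem.List.pyGetD S (2 * m) 0
        let s2m1 := if 0 ≤ 2 * m - 1 then PySem.List.pyGetD S (2 * m - 1) 0 else 0
        let a := s2m
        let b := PySem.Int.mod ((2 * m + 1) * s2m + s2m1) pvMOD
        (st.1.set m.toNat (PySem.Int.mod (df * a) pvMOD),
         st.2.1.set m.toNat (PySem.Int.mod (df * b) pvMOD), df))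
      (List.replicate (n+1) 0, List.replicate (n+1) 0, 1))
    = ((List.range (n+1)).map (fun m => if m < j then pvA n v m else 0),
       (List.range (n+1)).map (fun m => if m < j then pvB n v m else 0),
       pvDf (j-1)) := by
  induction j with
  | zero =>
    rw [Nat.cast_zero, PySem.List.pyRange_one_eq_nil (by norm_num), List.foldl_nil]
    simp [pvDf]
  | succ j ih =>
    have hj' : j ≤ n+1 := by omega
    have hjn : j ≤ n := by omega
    have hcast : ((j+1 : ℕ) : Int) = ((j:ℕ):Int)+1 := by push_cast; ring
    rw [hcast, PySem.List.pyRange_one_succ_right (by positivity), List.foldl_append,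
        ih hj', List.foldl_cons, List.foldl_nil]
    have hdf : (if 0 < ((j:ℕ):Int) then PySem.Int.mod (pvDf (j-1) * (2 * ((j:ℕ):Int) - 1)) pvMOD
        else pvDf (j-1)) = pvDf j := by
      cases j with
      | zero => simp
      | succ i =>
        rw [if_pos (by positivity)]
        have hcf : (2 * (((i+1:ℕ)):Int) - 1) = 2*((i:Int)+1) - 1 := by push_cast; ring
        rw [hcf, pvDf]
        norm_num
    have hs2m : PySem.List.pyGetD S (2 * ((j:ℕ):Int)) 0 = pvSAcc n v (2*j) := by
      have hc : 2 * ((j:ℕ):Int) = ((2*j : ℕ):Int) := by push_cast; ring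
      rw [hc, PySem.List.pyGetD_natCast]
      exact hS (2*j) (by omega)
    have hs2m1 : (if 0 ≤ 2 * ((j:ℕ):Int) - 1 then PySem.List.pyGetD S (2 * ((j:ℕ):Int) - 1) 0 else 0)
        = (if 1 ≤ j then pvSAcc n v (2*j-1) else 0) := by
      cases j with
      | zero => norm_num
      | succ i =>
        rw [if_pos (by push_cast; omega), if_pos (by omega)]
        have hc : 2 * (((i+1:ℕ)):Int) - 1 = ((2*(i+1)-1 : ℕ):Int) := by omega
        rw [hc, PySem.List.pyGetD_natCast]
        exact hS (2*(i+1)-1) (by omega)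
    simp only [hdf, hs2m, hs2m1, Int.toNat_natCast]
    rw [set_map_range _ j (by omega), set_map_range _ j (by omega)]
    refine Prod.ext ?_ (Prod.ext ?_ (by simp))
    all_goals {
      show (List.range (n+1)).map _ = (List.range (n+1)).map _
      apply map_range_congr
      intro k hk
      by_cases hkj : k = j
      · subst hkj; simp [pvA, pvB]
      · simp only [if_neg hkj]
        by_cases hkl : k < j
        · rw [if_pos hkl, if_pos (by omega)]
        · rw [if_neg hkl, if_neg (by omega)] }

-- ---- exactness of B's running accumulators ----
lemma f_step_zero (n : ℕ) (v : Int) (hv0 : 0 ≤ v) (hv1 : v < pvMOD) :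
    PySem.Int.mod (0 + pvInv n v 0) pvMOD = pvSAcc n v 0 := by
  have h := pvInv_bounds n v hv0 hv1 0
  have : pvSAcc n v 0 = pvInv n v 0 := by
    simp only [pvSAcc, pvStep, pvTerm]
    norm_num
    omega
  rw [this, zero_add, pvmod_emod, Int.emod_eq_of_lt h.1 h.2]

lemma f_step (n : ℕ) (v : Int) (hv0 : 0 ≤ v) (hv1 : v < pvMOD) (k : ℕ) :
    (if (k+1) % 2 = 1 then PySem.Int.mod (pvSAcc n v k - pvInv n v (k+1)) pvMOD
     else PySem.Int.mod (pvSAcc n v k + pvInv n v (k+1)) pvMOD) = pvSAcc n v (k+1) := by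
  have hs := pvSAcc_bounds n v hv0 hv1 k
  have ht := pvInv_bounds n v hv0 hv1 (k+1)
  by_cases hpar : (k+1) % 2 = 1
  · rw [if_pos hpar]
    apply modp_eq
    · exact (pvSAcc_bounds n v hv0 hv1 (k+1)).1
    · exact (pvSAcc_bounds n v hv0 hv1 (k+1)).2
    · simp only [pvSAcc, pvStep, pvTerm, if_pos hpar]
      split <;> [exact ⟨0, by ring⟩; exact ⟨-1, by ring⟩]
  · rw [if_neg hpar]
    apply modp_eq
    · exact (pvSAcc_bounds n v hv0 hv1 (k+1)).1
    · exact (pvSAcc_bounds n v hv0 hv1 (k+1)).2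
    · simp only [pvSAcc, pvStep, pvTerm, if_neg hpar]
      split <;> [exact ⟨1, by ring⟩; exact ⟨0, by ring⟩]

-- ---- characterisation of B's main fold ----
lemma bfold_char (n : ℕ) (v : Int) (hv0 : 0 ≤ v) (hv1 : v < pvMOD) (L : List Int)
    (hL : ∀ k ≤ 2*n, L.getD k 0 = pvInv n v k) (j : ℕ) (hj : j ≤ n+1) :
    ((PySem.List.pyRange 0 ((j:ℕ):Int) 1).foldl
      (fun (st : List Int × List Int × Int × Int × Int) m =>
        let df := if 0 < m then PySem.Int.mod (st.2.2.1 * (2 * m - 1)) pvMOD else st.2.2.1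
        let fg := [2 * m - 1, 2 * m].foldl
          (fun (fg : Int × Int) idx =>
            if 0 ≤ idx then
              let t := PySem.List.pyGetD L idx 0
              let f := if PySem.Int.band idx 1 ≠ 0 then PySem.Int.mod (fg.1 - t) pvMOD
                       else PySem.Int.mod (fg.1 + t) pvMOD
              (f, PySem.Int.mod (fg.2 + f) pvMOD)
            else fg)
          (st.2.2.2.1, st.2.2.2.2)
        (st.1 ++ [PySem.Int.mod (df * fg.1) pvMOD],
         st.2.1 ++ [PySem.Int.mod (df * fg.2) pvMOD], df, fg.1, fg.2))
      ([], [], 1, 0, 0))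
    = ((List.range j).map (pvA n v), (List.range j).map (pvB' n v), pvDf (j-1),
       if j = 0 then 0 else pvSAcc n v (2*(j-1)),
       if j = 0 then 0 else pvGI n v (2*(j-1))) := by
  induction j with
  | zero =>
    rw [Nat.cast_zero, PySem.List.pyRange_one_eq_nil (by norm_num), List.foldl_nil]
    simp [pvDf]
  | succ j ih =>
    have hj' : j ≤ n+1 := by omega
    have hjn : j ≤ n := by omega
    have hcast : ((j+1 : ℕ) : Int) = ((j:ℕ):Int)+1 := by push_cast; ring
    rw [hcast, PySem.List.pyRange_one_succ_right (by positivity), List.foldl_append,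
        ih hj', List.foldl_cons, List.foldl_nil]
    have hdf : (if 0 < ((j:ℕ):Int) then PySem.Int.mod (pvDf (j-1) * (2 * ((j:ℕ):Int) - 1)) pvMOD
        else pvDf (j-1)) = pvDf j := by
      cases j with
      | zero => simp
      | succ i =>
        rw [if_pos (by positivity)]
        have hcf : (2 * (((i+1:ℕ)):Int) - 1) = 2*((i:Int)+1) - 1 := by push_cast; ring
        rw [hcf, pvDf]
        norm_num
    -- the inner two-element fold
    have hfg : ([2 * ((j:ℕ):Int) - 1, 2 * ((j:ℕ):Int)].foldl
        (fun (fg : Int × Int) idx =>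
          if 0 ≤ idx then
            let t := PySem.List.pyGetD L idx 0
            let f := if PySem.Int.band idx 1 ≠ 0 then PySem.Int.mod (fg.1 - t) pvMOD
                     else PySem.Int.mod (fg.1 + t) pvMOD
            (f, PySem.Int.mod (fg.2 + f) pvMOD)
          else fg)
        ((if j = 0 then 0 else pvSAcc n v (2*(j-1))), (if j = 0 then 0 else pvGI n v (2*(j-1)))))
        = (pvSAcc n v (2*j), pvGI n v (2*j)) := by
      cases j with
      | zero =>
        simp only [List.foldl_cons, List.foldl_nil]
        norm_num
        have hb : PySem.Int.band 0 1 = 0 := by decide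
        rw [if_pos hb, PySem.List.pyGetD_zero]
        have hL0 : L.getD 0 0 = pvInv n v 0 := hL 0 (by omega)
        rw [hL0]
        have hf0 : PySem.Int.mod (pvInv n v 0) pvMOD = pvSAcc n v 0 := by
          have h := f_step_zero n v hv0 hv1
          rwa [zero_add] at h
        rw [hf0]
        refine ⟨rfl, ?_⟩
        have hs := pvSAcc_bounds n v hv0 hv1 0
        have : PySem.Int.mod (pvSAcc n v 0) pvMOD = pvSAcc n v 0 :=
          modp_eq _ _ hs.1 hs.2 (by simp)
        rw [this]
        show pvSAcc n v 0 = PySem.Int.mod (0 + pvSAcc n v 0) pvMOD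
        rw [zero_add, this]
      | succ i =>
        have hc1 : 2 * (((i+1:ℕ)):Int) - 1 = ((2*i+1 : ℕ):Int) := by push_cast; ring
        have hc2 : 2 * (((i+1:ℕ)):Int) = ((2*i+2 : ℕ):Int) := by push_cast; ring
        have hne : ¬(i+1 = 0) := Nat.succ_ne_zero i
        simp only [List.foldl_cons, List.foldl_nil, if_neg hne, Nat.add_sub_cancel]
        rw [hc1, hc2]
        rw [if_pos (show (0:Int) ≤ ((2*i+1:ℕ):Int) from by positivity),
            if_pos (show (0:Int) ≤ ((2*i+2:ℕ):Int) from by positivity)]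
        simp only [PySem.List.pyGetD_natCast]
        rw [hL (2*i+1) (by omega), hL (2*i+2) (by omega)]
        have hb1 : PySem.Int.band (((2*i+1 : ℕ)):Int) 1 ≠ 0 := by
          rw [(band_nat_one (2*i+1))]
          omega
        have hb2 : ¬ (PySem.Int.band (((2*i+2 : ℕ)):Int) 1 ≠ 0) := by
          intro h
          have := (band_nat_one (2*i+2)).mp h
          omega
        rw [if_pos hb1, if_neg hb2]
        have hf1 := f_step n v hv0 hv1 (2*i)
        rw [if_pos (by omega)] at hf1
        rw [hf1]
        have hf2 := f_step n v hv0 hv1 (2*i+1)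
        rw [if_neg (by omega)] at hf2
        rw [hf2]
        exact Prod.ext rfl rfl
    rw [hfg, hdf]
    have hr : List.range (j+1) = List.range j ++ [j] := List.range_succ
    rw [hr, List.map_append, List.map_append]
    norm_num [pvA, pvB']

-- ---- the congruence identity: running double prefix sum = closed form ----
def pvT (n : ℕ) (v : Int) (k : ℕ) : Int := (-1)^k * pvInv n v k

def pvSsum (n : ℕ) (v : Int) (k : ℕ) : Int := ∑ i ∈ Finset.range (k+1), pvT n v i

def pvGsum (n : ℕ) (v : Int) (k : ℕ) : Int := ∑ r ∈ Finset.range (k+1), pvSsum n v r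

lemma modp_modeq (x : Int) : PySem.Int.mod x pvMOD ≡ x [ZMOD pvMOD] := by
  rw [pvmod_emod]
  exact Int.emod_emod_of_dvd x dvd_rfl

lemma modp_congr (x y : Int) (h : x ≡ y [ZMOD pvMOD]) :
    PySem.Int.mod x pvMOD = PySem.Int.mod y pvMOD := by
  rw [pvmod_emod, pvmod_emod]; exact h

lemma step_modeq (acc t : Int) : pvStep acc t ≡ acc + t [ZMOD pvMOD] := by
  unfold pvStep
  split
  · exact Int.sub_emod_right _ _
  · rfl

lemma term_modeq (n : ℕ) (v : Int) (k : ℕ) : pvTerm n v k ≡ pvT n v k [ZMOD pvMOD] := by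
  unfold pvTerm pvT
  by_cases h : k % 2 = 1
  · rw [if_pos h, Odd.neg_one_pow (Nat.odd_iff.mpr h)]
    have : -1 * pvInv n v k - (pvMOD - pvInv n v k) = -pvMOD := by ring
    exact (Int.modEq_iff_dvd.mpr (by rw [this]; exact ⟨-1, by ring⟩))
  · rw [if_neg h, Even.neg_one_pow (Nat.even_iff.mpr (by omega))]
    rw [one_mul]

lemma sacc_modeq (n : ℕ) (v : Int) (k : ℕ) : pvSAcc n v k ≡ pvSsum n v k [ZMOD pvMOD] := by
  induction k with
  | zero =>
    refine (step_modeq 0 (pvTerm n v 0)).trans ?_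
    rw [zero_add]
    exact (term_modeq n v 0).trans (by rw [pvSsum, Finset.sum_range_one])
  | succ k ih =>
    refine (step_modeq _ _).trans ?_
    rw [pvSsum, Finset.sum_range_succ]
    exact Int.ModEq.add ih (term_modeq n v (k+1))

lemma gi_modeq (n : ℕ) (v : Int) (k : ℕ) : pvGI n v k ≡ pvGsum n v k [ZMOD pvMOD] := by
  induction k with
  | zero =>
    refine (modp_modeq _).trans ?_
    rw [zero_add, pvGsum, Finset.sum_range_one]
    exact sacc_modeq n v 0
  | succ k ih =>
    refine (modp_modeq _).trans ?_
    rw [pvGsum, Finset.sum_range_succ]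
    exact Int.ModEq.add ih (sacc_modeq n v (k+1))

lemma inv_rec_modeq (n : ℕ) (v : Int) (i : ℕ) (hi : i < 2*n) :
    pvInv n v i ≡ pvInv n v (i+1) * ((i:Int)+1) [ZMOD pvMOD] := by
  have h1 : 2*n - i = (2*n - (i+1)) + 1 := by omega
  have h2 : ((2*n - (2*n - (i+1)) : ℕ) : Int) = (i:Int)+1 := by
    have h3 : 2*n - (2*n - (i+1)) = i+1 := by omega
    rw [h3]; push_cast; ring
  show pvInvDown (2*n) v (2*n - i) ≡ _ [ZMOD pvMOD]
  rw [h1]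
  show PySem.Int.mod (pvInvDown (2*n) v (2*n - (i+1)) * _) pvMOD ≡ _ [ZMOD pvMOD]
  rw [h2]
  exact modp_modeq _

-- transfer to ZMod 1000000007 for the algebraic identity
lemma cast_modeq_iff (x y : Int) :
    ((x : ZMod 1000000007) = (y : ZMod 1000000007)) ↔ x ≡ y [ZMOD pvMOD] := by
  rw [ZMod.intCast_eq_intCast_iff]
  constructor
  · intro h; exact_mod_cast h
  · intro h; exact_mod_cast h

lemma ssum_succ (n : ℕ) (v : Int) (k : ℕ) :
    pvSsum n v (k+1) = pvSsum n v k + pvT n v (k+1) := by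
  rw [pvSsum, pvSsum, Finset.sum_range_succ]

lemma gsum_identity (n : ℕ) (v : Int) (k : ℕ) (hk1 : 1 ≤ k) (hk : k ≤ 2*n) :
    pvGsum n v k ≡ ((k:Int)+1) * pvSsum n v k + pvSsum n v (k-1) [ZMOD pvMOD] := by
  rw [← cast_modeq_iff]
  push_cast
  induction k, hk1 using Nat.le_induction with
  | base =>
    have hrec := (cast_modeq_iff _ _).mpr (inv_rec_modeq n v 0 (by omega))
    push_cast at hrec
    simp only [pvGsum, pvSsum, pvT, Finset.sum_range_succ]
    push_cast
    simp only [one_mul, mul_one] at *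
    rw [hrec]
    push_cast
    ring
  | succ k hk1' ih =>
    have ih' := ih (by omega)
    have hrec := (cast_modeq_iff _ _).mpr (inv_rec_modeq n v k (by omega))
    push_cast at hrec
    have hS : (pvSsum n v (k+1) : ZMod 1000000007)
        = (pvSsum n v k : ZMod 1000000007) + ((-1)^(k+1) * pvInv n v (k+1) : Int) := by
      rw [pvSsum, pvSsum, Finset.sum_range_succ]
      push_cast [pvT]
      ring
    have hG : (pvGsum n v (k+1) : ZMod 1000000007)
        = (pvGsum n v k : ZMod 1000000007) + (pvSsum n v (k+1) : Int) := by
      rw [pvGsum, pvGsum, Finset.sum_range_succ]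
      push_cast
      ring
    have hsub : (k+1) - 1 = k := by omega
    rw [hsub, hG, ih']
    have hS' : (pvSsum n v (k+1) : ZMod 1000000007)
        = (pvSsum n v k : ZMod 1000000007) + (-1)^(k+1) * ((pvInv n v (k+1) : Int) : ZMod 1000000007) := by
      rw [hS]; push_cast; ring
    have hSkInt : pvSsum n v k = pvSsum n v (k-1) + pvT n v k := by
      have h := ssum_succ n v (k-1)
      rwa [show k-1+1 = k from by omega] at h
    have hSk : (pvSsum n v k : ZMod 1000000007)
        = (pvSsum n v (k-1) : ZMod 1000000007) + (-1)^k * ((pvInv n v k : Int) : ZMod 1000000007) := by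
      rw [hSkInt]; push_cast [pvT]; ring
    push_cast
    linear_combination (-((k:ZMod 1000000007)+1)) * hS' - hSk - (-1)^k * hrec

lemma bv_eq (n : ℕ) (v : Int) (m : ℕ) (hm : m ≤ n) :
    pvB n v m = pvB' n v m := by
  unfold pvB pvB'
  apply modp_congr
  apply Int.ModEq.mul_left
  refine (modp_modeq _).trans (Int.ModEq.trans ?_ (gi_modeq n v (2*m)).symm)
  by_cases hm1 : 1 ≤ m
  · rw [if_pos hm1]
    have hid := gsum_identity n v (2*m) (by omega) (by omega)
    refine Int.ModEq.trans ?_ hid.symm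
    have h1 : ((2*m : ℕ):Int) + 1 = 2*(m:Int)+1 := by push_cast; ring
    rw [h1]
    exact Int.ModEq.add (Int.ModEq.mul_left _ (sacc_modeq n v (2*m))) (sacc_modeq n v (2*m-1))
  · have hm0 : m = 0 := by omega
    subst hm0
    rw [if_neg hm1]
    have hg : pvGsum n v (2*0) = pvSsum n v 0 := by rw [pvGsum, Finset.sum_range_one]
    rw [hg]
    have h1 : (2*((0:ℕ):Int)+1) = 1 := by norm_num
    rw [h1, one_mul, add_zero]
    exact sacc_modeq n v 0

-- ---- the main equivalence on nonnegative inputs ----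
lemma getD_map_range' (m k : ℕ) (g : ℕ → Int) (hk : k < m) :
    ((List.range m).map g).getD k 0 = g k := by
  rw [List.getD_eq_getElem?_getD, List.getElem?_map, List.getElem?_range hk]
  rfl

lemma main_eq (n : ℕ) : build_series ((n:ℕ):Int) = build_series_alt ((n:ℕ):Int) := by
  obtain ⟨v, hv0, hv1, hchar⟩ := invfact_char n
  simp only [build_series, build_series_alt]
  have e3 : (2 * ((n:ℕ):Int) + 1) = ((2*n+1 : ℕ):Int) := by push_cast; ring
  have e5 : (((n:ℕ):Int) + 1) = ((n+1 : ℕ):Int) := by push_cast; ring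
  rw [e3, e5]
  simp only [Int.toNat_natCast]
  rw [sfold_char n v (pvInvfact ((n:ℕ):Int)) hchar (2*n+1) le_rfl]
  dsimp only
  have hSmap : ∀ k ≤ 2*n, ((List.range (2*n+1)).map
      (fun k => if k < 2*n+1 then pvSAcc n v k else 0)).getD k 0 = pvSAcc n v k := by
    intro k hk
    rw [getD_map_range' _ _ _ (by omega), if_pos (by omega)]
  rw [afold_char n v _ hSmap (n+1) le_rfl]
  rw [bfold_char n v hv0 hv1 (pvInvfact ((n:ℕ):Int)) hchar (n+1) le_rfl]
  dsimp only
  refine Prod.ext ?_ ?_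
  · apply map_range_congr
    intro k hk
    rw [if_pos (by omega)]
  · apply map_range_congr
    intro k hk
    rw [if_pos (by omega)]
    exact bv_eq n v k (by omega)

-- ===== VERDICT (by name: the statement is the Claim_ definition above) =====
theorem build_series_spec : Claim_equal_build_series := by
  intro M _ hM
  unfold Spec_build_series
  have h : M = ((M.toNat : ℕ) : Int) := (Int.toNat_of_nonneg hM).symm
  rw [h, main_eq]
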